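-- pv_equiv track=rewrite | github.com/johnjagu25/Machine-Learning | Python Daily coding challenge/find_longest_seq.py | findSequence
-- ===== SOURCE A (Python) =====
-- def findSequence(seq):
--     length = len(seq)
--     if length > 1:
--         largest = 2
--         count = 0
--         for val in range(length-2):
--             s = seq[val]
--             e = seq[val+1]
--             org = [s,e]
--             switch = True
--             for val2 in range(val+2,length):
--                 value = seq[val2]
--                 if switch :
--                     if s != value:
--                         org = []
--                         break
--                 else:
--                     if e != value:
--                         org = []
--                         break
--                     org.append(s)
--                     org.append(e)
--                     temp = len(org)
--                     if temp > largest: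
--                         largest = temp
--                 switch = not switch
--         return largest
-- ===== SOURCE B (Python) =====
-- def findSequence(seq):
--     if len(seq) <= 1:
--         return None
--     largest = 2
--     cur = 2
--     p2, p1 = seq[0], seq[1]
--     for x in seq[2:]:
--         cur = cur + 1 if x == p2 else 2
--         p2, p1 = p1, x
--         even = cur - cur % 2
--         if even > largest:
--             largest = even
--     return largest
-- ===== Notes on version B (the rewrite author's own statement) =====
-- stated objective: faster
-- what changed: Replaced A's quadratic scan that re-matches the a,b,a,b pattern from every start index with a single left-to-right pass that tracks the length of the current alternating run (seq[i] == seq[i-2]) and maximizes its even-floored length.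
import Mathlib
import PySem

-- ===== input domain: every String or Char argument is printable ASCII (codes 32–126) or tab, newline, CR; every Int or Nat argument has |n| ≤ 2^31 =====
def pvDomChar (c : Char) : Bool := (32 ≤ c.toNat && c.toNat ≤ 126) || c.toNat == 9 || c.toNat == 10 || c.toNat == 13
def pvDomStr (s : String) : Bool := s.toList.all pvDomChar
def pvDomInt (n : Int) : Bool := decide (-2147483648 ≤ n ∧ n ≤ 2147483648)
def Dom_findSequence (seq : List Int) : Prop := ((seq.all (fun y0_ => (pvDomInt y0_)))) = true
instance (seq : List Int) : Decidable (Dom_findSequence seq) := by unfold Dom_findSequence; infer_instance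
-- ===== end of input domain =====

-- B replaces A's quadratic scan from every start with a single left-to-right pass that tracks
-- the current alternating-run length (objective: faster, asymptotic O(n) vs O(n^2)).


-- ===== PORT A =====
-- Inner loop of A over the index list range(val+2, length); `org`, `switch`, `largest` are the
-- loop state; `break` is the non-recursive return.  Indices produced by the loop are always in
-- range, so `pyGetD … 0` is exact here (the default is never read).
def fsInner (seq : List Int) (s e : Int) : List Int → List Int → Bool → Int → Int
  | [], _, _, largest => largest
  | val2 :: rest, org, switch, largest =>
    let value := PySem.List.pyGetD seq val2 0
    if switch then
      if s ≠ value then largest                         -- org = []; break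
      else fsInner seq s e rest org (!switch) largest
    else
      if e ≠ value then largest                         -- org = []; break
      else
        let org' := org ++ [s, e]
        let temp : Int := org'.length
        let largest' := if temp > largest then temp else largest
        fsInner seq s e rest org' (!switch) largest'

-- one iteration of A's outer loop (body of `for val in range(length-2)`)
def aStep (seq : List Int) (largest val : Int) : Int :=
  let s := PySem.List.pyGetD seq val 0
  let e := PySem.List.pyGetD seq (val + 1) 0
  fsInner seq s e (PySem.List.pyRange (val + 2) (seq.length : Int)) [s, e] true largest

def findSequence (seq : List Int) : Option Int :=
  let length : Int := seq.length
  if length > 1 then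
    some ((PySem.List.pyRange 0 (length - 2)).foldl (aStep seq) 2)
  else none   -- Python falls off the function body: returns None

-- ===== PORT B =====
-- one iteration of B's loop; state = (largest, cur, p2, p1)
def bStep (st : Int × Int × Int × Int) (x : Int) : Int × Int × Int × Int :=
  let largest := st.1
  let cur0 := st.2.1
  let p2 := st.2.2.1
  let cur := if x = p2 then cur0 + 1 else 2
  let even := cur - PySem.Int.mod cur 2
  ((if even > largest then even else largest), cur, st.2.2.2, x)

def findSequence_alt (seq : List Int) : Option Int :=
  if seq.length ≤ 1 then none
  else
    some ((PySem.List.slice seq (some 2)).foldl bStep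
      (2, 2, PySem.List.pyGetD seq 0 0, PySem.List.pyGetD seq 1 0)).1

-- ===== PRECONDITION & SPEC =====
def Spec_findSequence (seq : List Int) (out : Option Int) : Prop := out = findSequence_alt seq
instance (seq : List Int) (out : Option Int) : Decidable (Spec_findSequence seq out) := by unfold Spec_findSequence; infer_instance

-- ===== CLAIM (what is proved, stated in full; the proofs are below) =====
def Claim_equal_findSequence : Prop := ∀ (seq : List Int), Dom_findSequence seq → Spec_findSequence seq (findSequence seq)

-- ===== LEMMAS AND PROOFS =====

-- even floor
def ef (n : Int) : Int := n - n % 2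

-- forward matched count of the alternating pattern s,e,s,e,… along a list
def runF : Int → Int → List Int → Int
  | _, _, [] => 0
  | s, e, x :: xs => if x = s then 1 + runF e s xs else 0

-- max over all suffixes of even-floored forward-run length (A's quantity)
def maxRunsFrom : List Int → Int
  | a :: b :: t => max (2 + ef (runF a b t)) (maxRunsFrom (b :: t))
  | _ => 2

-- B's quantity: max of even-floored run lengths ending at each traversed element
def maxB : Int → Int → Int → List Int → Int
  | _, _, _, [] => 2
  | cur, p2, p1, x :: t =>
    max (ef (if x = p2 then cur + 1 else 2)) (maxB (if x = p2 then cur + 1 else 2) p1 x t)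

-- value-level version of A's inner loop (org only matters through its length)
def gInner : Int → Int → List Int → Bool → Int → Int → Int
  | _, _, [], _, _, largest => largest
  | s, e, v :: vs, switch, k, largest =>
    if switch then
      if s ≠ v then largest else gInner s e vs false k largest
    else
      if e ≠ v then largest
      else gInner s e vs true (k + 2) (if k + 2 > largest then k + 2 else largest)

theorem runF_nonneg (s e : Int) (t : List Int) : 0 ≤ runF s e t := by
  induction t generalizing s e with
  | nil => simp [runF]
  | cons x xs ih =>
    simp only [runF]
    split <;> [linarith [ih e s]; omega]

theorem fsInner_eq_gInner (seq : List Int) (s e : Int) (idxs org : List Int)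
    (sw : Bool) (largest : Int) :
    fsInner seq s e idxs org sw largest
      = gInner s e (idxs.map (fun i => PySem.List.pyGetD seq i 0)) sw (org.length : Int) largest := by
  induction idxs generalizing org sw largest with
  | nil => simp [fsInner, gInner]
  | cons i rest ih =>
    cases sw with
    | true =>
      simp only [fsInner, gInner, List.map_cons, Bool.not_true]
      rw [if_pos trivial, if_pos trivial]
      by_cases h : s ≠ PySem.List.pyGetD seq i 0
      · rw [if_pos h, if_pos h]
      · rw [if_neg h, if_neg h]
        exact ih org false largest
    | false =>
      simp only [fsInner, gInner, List.map_cons, Bool.not_false]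
      rw [if_neg Bool.false_ne_true, if_neg Bool.false_ne_true]
      by_cases h : e ≠ PySem.List.pyGetD seq i 0
      · rw [if_pos h, if_pos h]
      · rw [if_neg h, if_neg h]
        have hlen : ((org ++ [s, e]).length : Int) = (org.length : Int) + 2 := by
          simp
        have h2 := ih (org ++ [s, e]) true
          (if ((org ++ [s, e]).length : Int) > largest then ((org ++ [s, e]).length : Int) else largest)
        rw [hlen] at h2
        rw [hlen]
        exact h2

theorem gInner_char (vs : List Int) : ∀ (s e k largest : Int),
    k ≤ largest → 0 ≤ k → k % 2 = 0 →
    gInner s e vs true k largest = max largest (k + ef (runF s e vs)) ∧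
    gInner s e vs false k largest = max largest (k + ef (1 + runF e s vs)) := by
  induction vs with
  | nil =>
    intro s e k largest hkl hk he
    constructor <;> simp [gInner, runF, ef] <;> omega
  | cons v vs ih =>
    intro s e k largest hkl hk he
    constructor
    · -- switch = true
      simp only [gInner]
      rw [if_pos trivial]
      rcases eq_or_ne s v with hv | hv
      · have h : ¬ (s ≠ v) := by simp [hv]
        have hr : runF s e (v :: vs) = 1 + runF e s vs := by simp [runF, hv]
        rw [if_neg h, (ih s e k largest hkl hk he).2, hr]
      · have hr : runF s e (v :: vs) = 0 := by simp [runF, Ne.symm hv]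
        rw [if_pos hv, hr]
        simp [ef]; omega
    · -- switch = false
      simp only [gInner]
      rw [if_neg Bool.false_ne_true]
      rcases eq_or_ne e v with hv | hv
      · have h : ¬ (e ≠ v) := by simp [hv]
        have hr : runF e s (v :: vs) = 1 + runF s e vs := by simp [runF, hv]
        have hkl' : k + 2 ≤ if k + 2 > largest then k + 2 else largest := by omega
        have h1 := (ih s e (k + 2) (if k + 2 > largest then k + 2 else largest)
          hkl' (by omega) (by omega)).1
        rw [if_neg h, h1, hr]
        have := runF_nonneg s e vs
        unfold ef; omega
      · have hr : runF e s (v :: vs) = 0 := by simp [runF, Ne.symm hv]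
        rw [if_pos hv, hr]
        simp [ef]; omega

-- A's inner loop on the real index range equals gInner on the dropped suffix
theorem inner_range_eq (seq : List Int) : ∀ (fuel v : Nat), seq.length - v = fuel →
    ∀ (s e : Int) (org : List Int) (largest : Int),
    fsInner seq s e (PySem.List.pyRange (v : Int) (seq.length : Int)) org true largest
      = gInner s e (seq.drop v) true (org.length : Int) largest := by
  intro fuel
  induction fuel with
  | zero =>
    intro v hv s e org largest
    have hge : (seq.length : Int) ≤ (v : Int) := by exact_mod_cast Nat.le_of_sub_eq_zero hv
    rw [PySem.List.pyRange_one_eq_nil hge, List.drop_eq_nil_of_le (by omega)]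
    simp [fsInner, gInner]
  | succ n ih =>
    intro v hv s e org largest
    have hlt : v < seq.length := by omega
    have hlt' : (v : Int) < (seq.length : Int) := by exact_mod_cast hlt
    rw [PySem.List.pyRange_one_cons hlt']
    have hdrop : seq.drop v = seq[v] :: seq.drop (v + 1) := List.drop_eq_getElem_cons hlt
    have hget : PySem.List.pyGetD seq (v : Int) 0 = seq[v] := by
      rw [PySem.List.pyGetD_natCast, List.getD_eq_getElem seq 0 hlt]
    rw [hdrop]
    simp only [fsInner, gInner, hget, Bool.not_true]
    rw [if_pos trivial, if_pos trivial]
    by_cases h : s ≠ seq[v]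
    · rw [if_pos h, if_pos h]
    · rw [if_neg h, if_neg h]
      -- one more step: switch is now false; peel the next index the same way
      rw [fsInner_eq_gInner]
      have hmap : (PySem.List.pyRange (((v + 1 : Nat)) : Int) (seq.length : Int)).map
          (fun i => PySem.List.pyGetD seq i 0) = seq.drop (v + 1) := by
        clear ih h hdrop hget
        have : ∀ (fuel w : Nat), seq.length - w = fuel →
            (PySem.List.pyRange (w : Int) (seq.length : Int)).map
              (fun i => PySem.List.pyGetD seq i 0) = seq.drop w := by
          intro fuel
          induction fuel with
          | zero =>
            intro w hw
            have hge : (seq.length : Int) ≤ (w : Int) := by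
              exact_mod_cast Nat.le_of_sub_eq_zero hw
            rw [PySem.List.pyRange_one_eq_nil hge, List.drop_eq_nil_of_le (by omega)]
            simp
          | succ m ihm =>
            intro w hw
            have hwlt : w < seq.length := by omega
            rw [PySem.List.pyRange_one_cons (by exact_mod_cast hwlt), List.map_cons,
              List.drop_eq_getElem_cons hwlt]
            have : ((w : Int) + 1) = ((w + 1 : Nat) : Int) := by push_cast; ring
            rw [PySem.List.pyGetD_natCast, List.getD_eq_getElem seq 0 hwlt, this,
              ihm (w + 1) (by omega)]
        exact this (seq.length - (v + 1)) (v + 1) rfl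
      have hc : ((v : Int) + 1) = ((v + 1 : Nat) : Int) := by push_cast; ring
      rw [hc, hmap]

-- A's outer loop accumulates max largest (maxRunsFrom (seq.drop v))
theorem outer_eq (seq : List Int) : ∀ (fuel v : Nat), seq.length - v = fuel →
    ∀ (largest : Int), 2 ≤ largest →
    (PySem.List.pyRange (v : Int) ((seq.length : Int) - 2)).foldl (aStep seq) largest
      = max largest (maxRunsFrom (seq.drop v)) := by
  intro fuel
  induction fuel with
  | zero =>
    intro v hv largest hl
    have hge : (seq.length : Int) - 2 ≤ (v : Int) := by
      have : seq.length ≤ v := Nat.le_of_sub_eq_zero hv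
      have : (seq.length : Int) ≤ (v : Int) := by exact_mod_cast this
      omega
    rw [PySem.List.pyRange_one_eq_nil hge, List.drop_eq_nil_of_le (by omega)]
    simp [maxRunsFrom]; omega
  | succ n ih =>
    intro v hv largest hl
    by_cases hend : (seq.length : Int) - 2 ≤ (v : Int)
    · rw [PySem.List.pyRange_one_eq_nil hend, List.foldl_nil]
      -- drop v has length ≤ 2: maxRunsFrom is 2
      have hlen : (seq.drop v).length ≤ 2 := by
        rw [List.length_drop]; omega
      have h2 : maxRunsFrom (seq.drop v) = 2 := by
        cases hq : seq.drop v with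
        | nil => simp [maxRunsFrom]
        | cons a rest =>
          cases rest with
          | nil => simp [maxRunsFrom]
          | cons b t =>
            have hlen2 := congrArg List.length hq
            simp [List.length_drop] at hlen2
            have ht : t = [] := List.eq_nil_of_length_eq_zero (by omega)
            subst ht
            simp [maxRunsFrom, runF, ef]
      rw [h2]; omega
    · rw [PySem.List.pyRange_one_cons (by omega : (v : Int) < (seq.length : Int) - 2)]
      have hv2 : v + 2 ≤ seq.length := by omega
      have hv1 : v < seq.length := by omega
      have hv1' : v + 1 < seq.length := by omega
      rw [List.foldl_cons]
      rw [show aStep seq largest (v : Int)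
          = fsInner seq (PySem.List.pyGetD seq (v : Int) 0) (PySem.List.pyGetD seq ((v : Int) + 1) 0)
              (PySem.List.pyRange ((v : Int) + 2) (seq.length : Int))
              [PySem.List.pyGetD seq (v : Int) 0, PySem.List.pyGetD seq ((v : Int) + 1) 0] true largest
          from rfl]
      have hs : PySem.List.pyGetD seq (v : Int) 0 = seq[v] := by
        rw [PySem.List.pyGetD_natCast, List.getD_eq_getElem seq 0 hv1]
      have he : PySem.List.pyGetD seq ((v : Int) + 1) 0 = seq[v + 1] := by
        have : ((v : Int) + 1) = ((v + 1 : Nat) : Int) := by push_cast; ring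
        rw [this, PySem.List.pyGetD_natCast, List.getD_eq_getElem seq 0 hv1']
      have hcast2 : ((v : Int) + 2) = ((v + 2 : Nat) : Int) := by push_cast; ring
      rw [hs, he, hcast2, inner_range_eq seq (seq.length - (v + 2)) (v + 2) rfl]
      rw [show ((([seq[v], seq[v + 1]] : List Int)).length : Int) = 2 from by norm_num]
      have hg := (gInner_char (seq.drop (v + 2)) seq[v] seq[v + 1]
        ((([seq[v], seq[v + 1]] : List Int).length : Int)) largest (by simp; omega)
        (by simp) (by simp)).1
      simp only [List.length_cons, List.length_nil] at hg ⊢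
      norm_num at hg
      rw [hg]
      have hdropv : seq.drop v = seq[v] :: seq[v + 1] :: seq.drop (v + 2) := by
        rw [List.drop_eq_getElem_cons hv1, List.drop_eq_getElem_cons hv1']
      have hmax : 2 ≤ max largest (2 + ef (runF seq[v] seq[v + 1] (seq.drop (v + 2)))) := by
        omega
      have hcast1 : ((v : Int) + 1) = ((v + 1 : Nat) : Int) := by push_cast; ring
      rw [hcast1, ih (v + 1) (by omega) _ hmax, hdropv]
      show _ = max largest (maxRunsFrom (seq[v] :: seq[v+1] :: seq.drop (v+2)))
      have : seq.drop (v + 1) = seq[v + 1] :: seq.drop (v + 2) := List.drop_eq_getElem_cons hv1'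
      rw [this]
      simp only [maxRunsFrom]
      omega

-- B's fold computes max largest (maxB cur p2 p1 t)
theorem foldB_eq (t : List Int) : ∀ (largest cur p2 p1 : Int), 2 ≤ largest → 2 ≤ cur →
    (t.foldl bStep (largest, cur, p2, p1)).1 = max largest (maxB cur p2 p1 t) := by
  induction t with
  | nil => intro largest cur p2 p1 hl hc; simp [maxB]; omega
  | cons x t ih =>
    intro largest cur p2 p1 hl hc
    rw [List.foldl_cons]
    by_cases hx : x = p2
    · have hs2 : bStep (largest, cur, p2, p1) x
          = ((if ef (cur + 1) > largest then ef (cur + 1) else largest), cur + 1, p1, x) := by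
        simp only [bStep, ef, hx, if_true]
        rw [PySem.Int.mod_eq_emod_of_pos (show (0:Int) < 2 by omega)]
      rw [hs2, ih _ _ p1 x (by unfold ef at *; split_ifs <;> omega) (by omega)]
      simp only [maxB, if_pos hx]
      unfold ef at *; split_ifs <;> omega
    · have hs2 : bStep (largest, cur, p2, p1) x
          = ((if ef 2 > largest then ef 2 else largest), 2, p1, x) := by
        simp only [bStep, ef, if_neg hx]
        rw [PySem.Int.mod_eq_emod_of_pos (show (0:Int) < 2 by omega)]
      rw [hs2, ih _ _ p1 x (by unfold ef at *; split_ifs <;> omega) (by omega)]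
      simp only [maxB, if_neg hx]
      unfold ef at *; split_ifs <;> omega

-- the crux: the end-anchored maximum equals the start-anchored maximum
theorem crux (t : List Int) : ∀ (p2 p1 cur : Int), 2 ≤ cur →
    max (ef cur) (maxB cur p2 p1 t)
      = max (ef (cur + runF p2 p1 t)) (maxRunsFrom (p1 :: t)) := by
  induction t with
  | nil =>
    intro p2 p1 cur hc
    simp only [maxB, runF, maxRunsFrom]
    unfold ef; omega
  | cons x t ih =>
    intro p2 p1 cur hc
    by_cases hx : x = p2
    · subst hx
      simp only [maxB, runF, maxRunsFrom, if_true]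
      have h1 := ih p1 x (cur + 1) (by omega)
      have hr := runF_nonneg p1 x t
      unfold ef at h1 ⊢
      omega
    · simp only [maxB, runF, maxRunsFrom, if_neg hx]
      have h1 := ih p1 x 2 (by omega)
      have hr := runF_nonneg p1 x t
      unfold ef at h1 ⊢
      omega

theorem maxRunsFrom_ge_two (l : List Int) : 2 ≤ maxRunsFrom l := by
  match l with
  | [] => simp [maxRunsFrom]
  | [a] => simp [maxRunsFrom]
  | a :: b :: t =>
    have := maxRunsFrom_ge_two (b :: t)
    simp only [maxRunsFrom]; omega

-- ===== VERDICT (by name: the statement is the Claim_ definition above) =====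
theorem findSequence_spec : Claim_equal_findSequence := by
  intro seq _
  unfold Spec_findSequence findSequence findSequence_alt
  by_cases hlen : 1 < (seq.length : Int)
  · have hlen' : ¬ seq.length ≤ 1 := by omega
    simp only [hlen, if_true, hlen', if_false]
    cases seq with
    | nil => simp at hlen
    | cons a s1 =>
    cases s1 with
    | nil => simp at hlen
    | cons b t =>
      congr 1
      have hA := outer_eq (a :: b :: t) (a :: b :: t).length 0 rfl 2 (le_refl 2)
      rw [show ((0 : Nat) : Int) = (0 : Int) from rfl] at hA
      rw [hA, List.drop_zero]
      have hB := foldB_eq t 2 2 a b (le_refl 2) (le_refl 2)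
      rw [PySem.List.slice_from _ (by omega : (0:Int) ≤ 2)]
      have hdrop2 : List.drop (2 : Int).toNat (a :: b :: t) = t := rfl
      have hga : PySem.List.pyGetD (a :: b :: t) 0 0 = a := by
        rw [show (0 : Int) = ((0 : Nat) : Int) from rfl, PySem.List.pyGetD_natCast]; rfl
      have hgb : PySem.List.pyGetD (a :: b :: t) 1 0 = b := by
        rw [show (1 : Int) = ((1 : Nat) : Int) from rfl, PySem.List.pyGetD_natCast]; rfl
      rw [hdrop2, hga, hgb, hB]
      have hcrux := crux t a b 2 (le_refl 2)
      have hef2 : ef 2 = 2 := by unfold ef; decide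
      rw [hef2] at hcrux
      have hmr : maxRunsFrom (a :: b :: t)
          = max (ef (2 + runF a b t)) (maxRunsFrom (b :: t)) := by
        simp only [maxRunsFrom]
        unfold ef
        have := runF_nonneg a b t
        omega
      have h2 := maxRunsFrom_ge_two (a :: b :: t)
      rw [hcrux, ← hmr]
      omega
  · have hlen' : seq.length ≤ 1 := by omega
    simp only [hlen, if_false, hlen', if_true]
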